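-- pv_equiv track=rewrite | github.com/Psyop/Cryptomatte | nuke/cryptomatte_utilities.py | encode_mattestr_to_fnmatch
-- ===== SOURCE A (Python) =====
-- def encode_mattestr_to_fnmatch(mattestr):
--     """ Converts the matte string to an fnmatch pattern.
--     Escaped tokens are isntead wrapped in [], as fnmatch
--     would like.
--     """
--     fn_token = "[]*?"
--     pattern = ""
--
--     escaped = False
--     for char in mattestr:
--         if char == "\\" and not escaped:
--             escaped = True
--         elif escaped:
--             if char in fn_token:
--                 pattern += "[%s]" % char
--             if char == "\\":
--                 pattern += "\\\\"
--             escaped = False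
--         else:
--             pattern += char
--     return pattern
-- ===== SOURCE B (Python) =====
-- import re
--
-- _ESCAPE_RE = re.compile(r'\\(.?)', re.DOTALL)
--
-- def _repl(m):
--     c = m.group(1)
--     if c == '\\':
--         return '\\\\'
--     if c and c in '[]*?':
--         return '[%s]' % c
--     return ''
--
-- def encode_mattestr_to_fnmatch(mattestr):
--     """ Converts the matte string to an fnmatch pattern. """
--     return _ESCAPE_RE.sub(_repl, mattestr)
-- ===== Notes on version B (the rewrite author's own statement) =====
-- stated objective: idiomatic
-- what changed: Replaces the explicit char-by-char loop with an escaped-flag state machine by a single compiled re.sub over r'\\(.?)' (DOTALL) with a small replacement function; untouched characters are copied by re.sub itself.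
import Mathlib
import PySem

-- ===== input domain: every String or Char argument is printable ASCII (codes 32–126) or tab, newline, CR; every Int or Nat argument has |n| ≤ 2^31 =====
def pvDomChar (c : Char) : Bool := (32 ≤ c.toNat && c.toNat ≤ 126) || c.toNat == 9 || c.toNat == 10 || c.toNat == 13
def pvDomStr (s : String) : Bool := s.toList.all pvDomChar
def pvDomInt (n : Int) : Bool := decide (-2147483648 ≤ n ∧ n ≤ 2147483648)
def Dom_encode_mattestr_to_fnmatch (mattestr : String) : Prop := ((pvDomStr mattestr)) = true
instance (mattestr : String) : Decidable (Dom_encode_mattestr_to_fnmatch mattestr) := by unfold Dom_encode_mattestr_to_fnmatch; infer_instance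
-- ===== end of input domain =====

-- B replaces A's char-by-char escape state machine by a single regex substitution
-- over r'\\(.?)' with a replacement function (objective: idiomatic).
-- ===== PORT A =====
-- A's fn_token = "[]*?"
def pvFnToken : List Char := ['[', ']', '*', '?']

-- A's loop: state (escaped, pattern), one character at a time.
def pvLoopA : List Char → Bool → List Char → List Char
  | [], _, pattern => pattern
  | c :: rest, escaped, pattern =>
    if c = '\\' ∧ escaped = false then
      pvLoopA rest true pattern
    else if escaped = true then
      -- both independent ifs of A's body, in order
      pvLoopA rest false
        ((pattern ++ (if c ∈ pvFnToken then '[' :: c :: [']'] else [])) ++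
          (if c = '\\' then ['\\', '\\'] else []))
    else
      pvLoopA rest false (pattern ++ [c])

def encode_mattestr_to_fnmatch (mattestr : String) : String :=
  String.ofList (pvLoopA mattestr.toList false [])

-- ===== PORT B =====
-- B's replacement function _repl: m.group(1) is `some d` for '\\d', `none` for a
-- trailing lone backslash (the '.?' matched the empty string).
def pvReplB : Option Char → List Char
  | some d =>
    if d = '\\' then ['\\', '\\']
    else if d ∈ pvFnToken then '[' :: d :: [']']
    else []
  | none => []

-- re.sub scan: non-backslash chars are copied; a backslash consumes the next
-- char (if any) and emits pvReplB.
def pvSubB : List Char → List Char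
  | [] => []
  | [c] => if c = '\\' then pvReplB none else [c]
  | c :: d :: rest =>
    if c = '\\' then pvReplB (some d) ++ pvSubB rest
    else c :: pvSubB (d :: rest)

def encode_mattestr_to_fnmatch_alt (mattestr : String) : String :=
  String.ofList (pvSubB mattestr.toList)

-- ===== PRECONDITION & SPEC =====
def Spec_encode_mattestr_to_fnmatch (mattestr : String) (out : String) : Prop := out = encode_mattestr_to_fnmatch_alt mattestr
instance (mattestr : String) (out : String) : Decidable (Spec_encode_mattestr_to_fnmatch mattestr out) := by unfold Spec_encode_mattestr_to_fnmatch; infer_instance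

-- ===== CLAIM (what is proved, stated in full; the proofs are below) =====
def Claim_equal_encode_mattestr_to_fnmatch : Prop := ∀ (mattestr : String), Dom_encode_mattestr_to_fnmatch mattestr → Spec_encode_mattestr_to_fnmatch mattestr (encode_mattestr_to_fnmatch mattestr)

-- ===== LEMMAS AND PROOFS =====
-- What B does after a consumed backslash: the "escaped" tail.
def pvEscTail : List Char → List Char
  | [] => pvReplB none
  | d :: rest => pvReplB (some d) ++ pvSubB rest

lemma pvSubB_backslash (l : List Char) : pvSubB ('\\' :: l) = pvEscTail l := by
  cases l <;> simp [pvSubB, pvEscTail]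

lemma pvSubB_cons_ne (c : Char) (l : List Char) (h : ¬ c = '\\') :
    pvSubB (c :: l) = c :: pvSubB l := by
  cases l <;> simp [pvSubB, h]

-- A's emitted text on an escaped character equals B's replacement.
lemma pvRepl_eq (c : Char) :
    (if c ∈ pvFnToken then '[' :: c :: [']'] else []) ++
      (if c = '\\' then ['\\', '\\'] else []) = pvReplB (some c) := by
  by_cases hb : c = '\\'
  · subst hb; simp [pvReplB, pvFnToken]
  · by_cases ht : c ∈ pvFnToken <;> simp [pvReplB, hb, ht]

lemma pvLoopA_eq (l : List Char) : ∀ (escaped : Bool) (acc : List Char),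
    pvLoopA l escaped acc = acc ++ (if escaped then pvEscTail l else pvSubB l) := by
  induction l with
  | nil => intro escaped acc; cases escaped <;> simp [pvLoopA, pvSubB, pvEscTail, pvReplB]
  | cons c rest ih =>
    intro escaped acc
    cases escaped with
    | false =>
      by_cases hb : c = '\\'
      · subst hb
        simp [pvLoopA, ih, pvSubB_backslash]
      · simp [pvLoopA, hb, ih, pvSubB_cons_ne c rest hb]
    | true =>
      have h : ¬ (c = '\\' ∧ (true : Bool) = false) := by simp
      simp only [pvLoopA, if_neg h, if_pos rfl, ih]
      simp [pvEscTail, pvRepl_eq]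

-- ===== VERDICT (by name: the statement is the Claim_ definition above) =====
theorem encode_mattestr_to_fnmatch_spec : Claim_equal_encode_mattestr_to_fnmatch := by
  intro mattestr _
  unfold Spec_encode_mattestr_to_fnmatch encode_mattestr_to_fnmatch encode_mattestr_to_fnmatch_alt
  rw [pvLoopA_eq]
  simp
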